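-- pv_equiv track=rewrite | github.com/mamo08/Evidencia-ejercicios-python | Miselanea de arreglos/preparcial document.py | elementos_comunes_emparejados
-- ===== SOURCE A (Python) =====
-- def elementos_comunes_emparejados(arr1, arr2):
--     # Crear diccionarios con conteos de cada elemento
--     from collections import defaultdict
--
--     count1 = defaultdict(int)
--     count2 = defaultdict(int)
--
--     for elem in arr1:
--         count1[elem] += 1
--
--     for elem in arr2:
--         count2[elem] += 1
--
--     # Encontrar elementos comunes y emparejarlos
--     resultado = []
--     for elem in set(arr1) & set(arr2):
--         min_count = min(count1[elem], count2[elem])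
--         resultado.extend([elem * 2] * min_count)
--
--     return sorted(resultado)
-- ===== SOURCE B (Python) =====
-- def elementos_comunes_emparejados(arr1, arr2):
--     # Two-pointer merge over sorted copies: collect elem*2 for each
--     # multiset-common occurrence; the result comes out already sorted.
--     s1 = sorted(arr1)
--     s2 = sorted(arr2)
--     i = j = 0
--     resultado = []
--     while i < len(s1) and j < len(s2):
--         if s1[i] < s2[j]:
--             i += 1
--         elif s2[j] < s1[i]:
--             j += 1
--         else:
--             resultado.append(s1[i] * 2)
--             i += 1
--             j += 1
--     return resultado
-- ===== Notes on version B (the rewrite author's own statement) =====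
-- stated objective: alternative
-- what changed: Replaces the defaultdict counting + set-intersection + per-element replicate + final sort with a two-pointer merge over the two sorted inputs that emits each common occurrence doubled, already in sorted order.
import Mathlib
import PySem

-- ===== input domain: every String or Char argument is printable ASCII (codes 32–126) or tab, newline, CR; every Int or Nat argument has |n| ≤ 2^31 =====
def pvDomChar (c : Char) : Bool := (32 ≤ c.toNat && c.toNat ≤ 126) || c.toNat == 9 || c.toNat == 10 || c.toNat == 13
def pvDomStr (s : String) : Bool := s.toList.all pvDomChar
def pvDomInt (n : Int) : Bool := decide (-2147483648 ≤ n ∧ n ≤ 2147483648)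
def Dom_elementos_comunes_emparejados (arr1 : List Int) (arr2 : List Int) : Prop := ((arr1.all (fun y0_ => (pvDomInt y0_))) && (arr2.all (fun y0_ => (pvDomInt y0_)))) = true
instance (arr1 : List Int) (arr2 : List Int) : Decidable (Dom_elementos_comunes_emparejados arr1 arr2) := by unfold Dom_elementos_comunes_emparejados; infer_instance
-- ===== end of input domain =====

-- B replaces A's counting-dicts + set-intersection + per-element replicate + final sort
-- with a two-pointer merge over the two sorted lists (alternative algorithm, same result).

-- ===== PORT A =====
-- literal port of Source A: two counting dicts, loop over set(arr1) & set(arr2) extending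
-- with [elem*2]*min_count, then sorted(resultado)
def elementos_comunes_emparejados (arr1 : List Int) (arr2 : List Int) : List Int :=
  let count1 : PySem.Dict Int Int := arr1.foldl (fun d e => d.modify e 0 (· + 1)) PySem.Dict.empty
  let count2 : PySem.Dict Int Int := arr2.foldl (fun d e => d.modify e 0 (· + 1)) PySem.Dict.empty
  let resultado : List Int :=
    (PySem.Set.inter (PySem.Set.ofList arr1) (PySem.Set.ofList arr2)).foldl
      (fun acc elem =>
        acc ++ List.replicate (min (count1.getD elem 0) (count2.getD elem 0)).toNat (elem * 2)) []
  PySem.List.sorted resultado (fun x => x) false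

-- ===== PORT B =====
-- literal port of Source B's while loop: advance the pointer at the smaller head,
-- emit head*2 and advance both on equality (transcribed as recursion on the two lists)
def pvMergeInter : List Int → List Int → List Int
  | [], _ => []
  | _ :: _, [] => []
  | a :: as, b :: bs =>
    if a < b then pvMergeInter as (b :: bs)
    else if b < a then pvMergeInter (a :: as) bs
    else a * 2 :: pvMergeInter as bs

def elementos_comunes_emparejados_alt (arr1 : List Int) (arr2 : List Int) : List Int :=
  pvMergeInter (PySem.List.sorted arr1 (fun x => x) false) (PySem.List.sorted arr2 (fun x => x) false)

-- ===== PRECONDITION & SPEC =====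
def Spec_elementos_comunes_emparejados (arr1 : List Int) (arr2 : List Int) (out : List Int) : Prop := out = elementos_comunes_emparejados_alt arr1 arr2
instance (arr1 : List Int) (arr2 : List Int) (out : List Int) : Decidable (Spec_elementos_comunes_emparejados arr1 arr2 out) := by unfold Spec_elementos_comunes_emparejados; infer_instance

-- ===== CLAIM (what is proved, stated in full; the proofs are below) =====
def Claim_equal_elementos_comunes_emparejados : Prop := ∀ (arr1 : List Int) (arr2 : List Int), Dom_elementos_comunes_emparejados arr1 arr2 → Spec_elementos_comunes_emparejados arr1 arr2 (elementos_comunes_emparejados arr1 arr2)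

-- ===== LEMMAS AND PROOFS =====

-- every element of the merge is a doubled element common to both lists
theorem pvMergeInter_mem {l1 l2 : List Int} {x : Int} (h : x ∈ pvMergeInter l1 l2) :
    ∃ c, c ∈ l1 ∧ c ∈ l2 ∧ x = c * 2 := by
  induction l1, l2 using pvMergeInter.induct with
  | case1 l2 => simp [pvMergeInter] at h
  | case2 a as => simp [pvMergeInter] at h
  | case3 a as b bs hab ih =>
    rw [pvMergeInter, if_pos hab] at h
    obtain ⟨c, hc1, hc2, hx⟩ := ih h
    exact ⟨c, List.mem_cons_of_mem _ hc1, hc2, hx⟩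
  | case4 a as b bs hab hba ih =>
    rw [pvMergeInter, if_neg hab, if_pos hba] at h
    obtain ⟨c, hc1, hc2, hx⟩ := ih h
    exact ⟨c, hc1, List.mem_cons_of_mem _ hc2, hx⟩
  | case5 a as b bs hab hba ih =>
    rw [pvMergeInter, if_neg hab, if_neg hba] at h
    have hEq : a = b := le_antisymm (not_lt.mp hba) (not_lt.mp hab)
    subst hEq
    rcases List.mem_cons.mp h with h | h
    · exact ⟨a, List.mem_cons_self .., List.mem_cons_self .., h⟩
    · obtain ⟨c, hc1, hc2, hx⟩ := ih h
      exact ⟨c, List.mem_cons_of_mem _ hc1, List.mem_cons_of_mem _ hc2, hx⟩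

-- the merge of two sorted lists is sorted
theorem pvMergeInter_pairwise (l1 l2 : List Int) :
    l1.Pairwise (· ≤ ·) → l2.Pairwise (· ≤ ·) → (pvMergeInter l1 l2).Pairwise (· ≤ ·) := by
  induction l1, l2 using pvMergeInter.induct with
  | case1 l2 => intro _ _; simp [pvMergeInter]
  | case2 a as => intro _ _; simp [pvMergeInter]
  | case3 a as b bs hab ih =>
    intro h1 h2
    rw [pvMergeInter, if_pos hab]
    exact ih (List.Pairwise.of_cons h1) h2
  | case4 a as b bs hab hba ih =>
    intro h1 h2
    rw [pvMergeInter, if_neg hab, if_pos hba]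
    exact ih h1 (List.Pairwise.of_cons h2)
  | case5 a as b bs hab hba ih =>
    intro h1 h2
    have hEq : a = b := le_antisymm (not_lt.mp hba) (not_lt.mp hab)
    subst hEq
    rw [pvMergeInter, if_neg hab, if_neg hba]
    refine List.pairwise_cons.mpr ⟨?_, ih (List.Pairwise.of_cons h1) (List.Pairwise.of_cons h2)⟩
    intro y hy
    obtain ⟨c, hc1, _, rfl⟩ := pvMergeInter_mem hy
    have : a ≤ c := (List.pairwise_cons.mp h1).1 c hc1
    omega

theorem count_eq_zero_of_lt_all {l : List Int} {a b : Int}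
    (hlt : a < b) (hall : ∀ y ∈ l, b ≤ y) : l.count a = 0 := by
  refine List.count_eq_zero.mpr (fun hm => ?_)
  have := hall a hm
  omega

-- multiset content of the merge: each doubled value appears min-count times
theorem pvMergeInter_count (l1 l2 : List Int) :
    l1.Pairwise (· ≤ ·) → l2.Pairwise (· ≤ ·) → ∀ x : Int,
    (pvMergeInter l1 l2).count (x * 2) = min (l1.count x) (l2.count x) := by
  induction l1, l2 using pvMergeInter.induct with
  | case1 l2 => intro _ _ x; simp [pvMergeInter]
  | case2 a as => intro _ _ x; simp [pvMergeInter]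
  | case3 a as b bs hab ih =>
    intro h1 h2 x
    rw [pvMergeInter, if_pos hab, ih (List.Pairwise.of_cons h1) h2 x]
    have hz : (b :: bs).count a = 0 :=
      count_eq_zero_of_lt_all hab (by
        intro y hy
        rcases List.mem_cons.mp hy with rfl | hy
        · exact le_refl _
        · exact (List.pairwise_cons.mp h2).1 y hy)
    by_cases hx : x = a
    · subst hx
      rw [List.count_cons_self, hz]
      omega
    · rw [List.count_cons_of_ne (Ne.symm hx)]
  | case4 a as b bs hab hba ih =>
    intro h1 h2 x
    rw [pvMergeInter, if_neg hab, if_pos hba, ih h1 (List.Pairwise.of_cons h2) x]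
    have hz : (a :: as).count b = 0 :=
      count_eq_zero_of_lt_all hba (by
        intro y hy
        rcases List.mem_cons.mp hy with rfl | hy
        · exact le_refl _
        · exact (List.pairwise_cons.mp h1).1 y hy)
    by_cases hx : x = b
    · subst hx
      rw [List.count_cons_self, hz]
      omega
    · rw [List.count_cons_of_ne (Ne.symm hx)]
  | case5 a as b bs hab hba ih =>
    intro h1 h2 x
    have hEq : a = b := le_antisymm (not_lt.mp hba) (not_lt.mp hab)
    subst hEq
    rw [pvMergeInter, if_neg hab, if_neg hba]
    by_cases hx : x = a
    · subst hx
      rw [List.count_cons_self, List.count_cons_self, List.count_cons_self,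
        ih (List.Pairwise.of_cons h1) (List.Pairwise.of_cons h2) x]
      omega
    · have hne : x * 2 ≠ a * 2 := by omega
      rw [List.count_cons_of_ne (Ne.symm hne), List.count_cons_of_ne (Ne.symm hx), List.count_cons_of_ne (Ne.symm hx),
        ih (List.Pairwise.of_cons h1) (List.Pairwise.of_cons h2) x]

-- count in a flatMap of replicates over a nodup index list
theorem pvCount_flatMap_replicate (L : List Int) (n : Int → Nat) (hms : L.Nodup) (x : Int) :
    (L.flatMap (fun e => List.replicate (n e) (e * 2))).count (x * 2)
      = if x ∈ L then n x else 0 := by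
  induction L with
  | nil => simp
  | cons e L ih =>
    rw [List.flatMap_cons, List.count_append, ih hms.of_cons]
    by_cases hx : x = e
    · subst hx
      have hnot : x ∉ L := (List.nodup_cons.mp hms).1
      simp [hnot]
    · have hne : x * 2 ≠ e * 2 := by omega
      have hx' : e ≠ x := Ne.symm hx
      simp [List.count_replicate, hx, hx']

theorem elementos_comunes_emparejados_spec' (arr1 arr2 : List Int) :
    elementos_comunes_emparejados arr1 arr2 = elementos_comunes_emparejados_alt arr1 arr2 := by
  unfold elementos_comunes_emparejados elementos_comunes_emparejados_alt
  dsimp only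
  set s1 := PySem.List.sorted arr1 (fun x => x) false with hs1
  set s2 := PySem.List.sorted arr2 (fun x => x) false with hs2
  set I : List Int := PySem.Set.inter (PySem.Set.ofList arr1) (PySem.Set.ofList arr2) with hI
  -- the accumulating loop is a flatMap
  rw [PySem.List.foldl_append_eq_flatMap]
  simp only [List.nil_append]
  -- the two counting dicts are counters
  have hc1 : ∀ e : Int,
      ((arr1.foldl (fun d e => d.modify e 0 (· + 1)) PySem.Dict.empty).getD e 0) = (arr1.count e : Int) := by
    intro e; rw [PySem.Dict.getD_foldl_modify_add_one]; simp [PySem.Dict.empty, PySem.Dict.getD, PySem.Dict.get?]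
  have hc2 : ∀ e : Int,
      ((arr2.foldl (fun d e => d.modify e 0 (· + 1)) PySem.Dict.empty).getD e 0) = (arr2.count e : Int) := by
    intro e; rw [PySem.Dict.getD_foldl_modify_add_one]; simp [PySem.Dict.empty, PySem.Dict.getD, PySem.Dict.get?]
  simp only [hc1, hc2]
  -- B's merge output is sorted
  have hp1 : s1.Pairwise (· ≤ ·) := PySem.List.sorted_pairwise arr1 (fun x => x)
  have hp2 : s2.Pairwise (· ≤ ·) := PySem.List.sorted_pairwise arr2 (fun x => x)
  have hBsorted : (pvMergeInter s1 s2).Pairwise (· ≤ ·) := pvMergeInter_pairwise s1 s2 hp1 hp2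
  have hInodup : I.Nodup := PySem.Set.nodup_inter _ _ (PySem.Set.nodup_ofList arr1)
  have hImem : ∀ x : Int, x ∈ I ↔ x ∈ arr1 ∧ x ∈ arr2 := by
    intro x
    rw [hI, PySem.Set.mem_inter, PySem.Set.mem_ofList, PySem.Set.mem_ofList]
  -- the two raw results carry the same multiset
  have hperm : (pvMergeInter s1 s2).Perm
      (I.flatMap (fun e => List.replicate (min ((arr1.count e : Int)) ((arr2.count e : Int))).toNat (e * 2))) := by
    rw [List.perm_iff_count]
    intro y
    rcases Int.even_or_odd y with ⟨r, hr⟩ | ⟨r, hr⟩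
    · have hy : y = r * 2 := by omega
      subst hy
      rw [pvMergeInter_count s1 s2 hp1 hp2 r,
        pvCount_flatMap_replicate I _ hInodup r,
        (PySem.List.sorted_perm arr1 (fun x => x) false).count_eq r,
        (PySem.List.sorted_perm arr2 (fun x => x) false).count_eq r]
      by_cases hin : r ∈ I
      · rw [if_pos hin]; omega
      · rw [if_neg hin]
        rcases not_and_or.mp ((hImem r).not.mp hin) with h | h
        · rw [List.count_eq_zero.mpr h]; omega
        · rw [List.count_eq_zero.mpr h]; omega
    · have hB : (pvMergeInter s1 s2).count y = 0 := by
        refine List.count_eq_zero.mpr (fun hm => ?_)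
        obtain ⟨c, _, _, rfl⟩ := pvMergeInter_mem hm
        omega
      have hA : (I.flatMap (fun e => List.replicate (min ((arr1.count e : Int)) ((arr2.count e : Int))).toNat (e * 2))).count y = 0 := by
        refine List.count_eq_zero.mpr (fun hm => ?_)
        obtain ⟨e, _, hm2⟩ := List.mem_flatMap.mp hm
        have := List.eq_of_mem_replicate hm2
        omega
      rw [hA, hB]
  exact PySem.List.sorted_id_eq_of_perm_of_pairwise _ _ hperm hBsorted

-- ===== VERDICT (by name: the statement is the Claim_ definition above) =====
theorem elementos_comunes_emparejados_spec : Claim_equal_elementos_comunes_emparejados := by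
  intro arr1 arr2 _
  exact elementos_comunes_emparejados_spec' arr1 arr2
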